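-- pv_equiv track=rewrite | github.com/emiwltz/pisicine_python | 03/ex3/ft_achievement_tracker.py | get_common_achievements
-- ===== SOURCE A (Python) =====
-- ACHIEVEMENTS = [
--     "Crafting Genius",
--     "World Savior",
--     "Master Explorer",
--     "Collector Supreme",
--     "Untouchable",
--     "Boss Slayer",
--     "Strategist",
--     "Speed Runner",
--     "Survivor",
--     "Treasure Hunter",
--     "Hidden Path Finder",
--     "Sharp Mind",
-- ]
--
-- def get_common_achievements(
--     players: list[tuple[str, set[str]]],
-- ) -> set[str]:
--     common_achievements = set(ACHIEVEMENTS)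
--     for _, achievements in players:
--         common_achievements = common_achievements.intersection(
--             achievements
--         )
--     return common_achievements
-- ===== SOURCE B (Python) =====
-- ACHIEVEMENTS = [
--     "Crafting Genius",
--     "World Savior",
--     "Master Explorer",
--     "Collector Supreme",
--     "Untouchable",
--     "Boss Slayer",
--     "Strategist",
--     "Speed Runner",
--     "Survivor",
--     "Treasure Hunter",
--     "Hidden Path Finder",
--     "Sharp Mind",
-- ]
--
-- def get_common_achievements(
--     players: list[tuple[str, set[str]]],
-- ) -> set[str]:
--     # Recursive decomposition instead of A's iterative shrinking accumulator:
--     # the base case of the recursion yields the full fixed candidate list, and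
--     # each level, on the way OUT of the recursion, keeps only the candidates
--     # the head player also has (so players are applied back-to-front).
--     def survivors(ps: list[tuple[str, set[str]]]) -> list[str]:
--         if not ps:
--             return list(ACHIEVEMENTS)
--         head_achievements = ps[0][1]
--         return [a for a in survivors(ps[1:]) if a in head_achievements]
--     return set(survivors(players))
-- ===== Notes on version B (the rewrite author's own statement) =====
-- stated objective: alternative
-- what changed: Replaces A's iterative loop that shrinks an accumulator set by intersecting it with each player in turn by a non-tail recursion over the player list whose base case yields the fixed ACHIEVEMENTS list and which filters the candidates by one player on the way out of each recursive call (players applied back-to-front), converting to a set only at the end.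
import Mathlib
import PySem

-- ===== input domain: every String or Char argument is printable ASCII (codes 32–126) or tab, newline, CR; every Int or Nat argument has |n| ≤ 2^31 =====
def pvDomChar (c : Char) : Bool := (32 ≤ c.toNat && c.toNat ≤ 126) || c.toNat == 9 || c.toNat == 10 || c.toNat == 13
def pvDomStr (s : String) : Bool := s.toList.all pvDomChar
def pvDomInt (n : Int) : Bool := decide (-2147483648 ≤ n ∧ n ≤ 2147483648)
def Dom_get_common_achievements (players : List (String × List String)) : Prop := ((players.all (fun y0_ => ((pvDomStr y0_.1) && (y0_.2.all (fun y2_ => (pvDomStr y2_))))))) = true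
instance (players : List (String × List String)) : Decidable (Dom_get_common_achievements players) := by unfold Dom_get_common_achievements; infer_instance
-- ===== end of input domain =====

-- B replaces A's iterative shrinking-intersection loop by a non-tail recursion over the
-- players whose base case is the fixed ACHIEVEMENTS list, filtering candidates on the way out.


def ACHIEVEMENTS : List String :=
  ["Crafting Genius", "World Savior", "Master Explorer", "Collector Supreme",
   "Untouchable", "Boss Slayer", "Strategist", "Speed Runner", "Survivor",
   "Treasure Hunter", "Hidden Path Finder", "Sharp Mind"]

-- ===== PORT A =====
-- common = set(ACHIEVEMENTS); for _, achievements in players: common = common.intersection(achievements)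
def get_common_achievements (players : List (String × List String)) : List String :=
  players.foldl (fun common p => PySem.Set.inter common p.2)
    (PySem.Set.ofList ACHIEVEMENTS)

-- ===== PORT B =====
-- def survivors(ps): if not ps: return list(ACHIEVEMENTS)
--                    return [a for a in survivors(ps[1:]) if a in ps[0][1]]
def survivors : List (String × List String) → List String
  | [] => ACHIEVEMENTS
  | p :: ps => (survivors ps).filter (fun a => p.2.contains a)

-- return set(survivors(players))
def get_common_achievements_alt (players : List (String × List String)) : List String :=
  PySem.Set.ofList (survivors players)

-- ===== PRECONDITION & SPEC =====
def Spec_get_common_achievements (players : List (String × List String)) (out : List String) : Prop := out = get_common_achievements_alt players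
instance (players : List (String × List String)) (out : List String) : Decidable (Spec_get_common_achievements players out) := by unfold Spec_get_common_achievements; infer_instance

-- ===== CLAIM =====
def Claim_equal_get_common_achievements : Prop := ∀ (players : List (String × List String)), Dom_get_common_achievements players → Spec_get_common_achievements players (get_common_achievements players)

-- ===== LEMMAS AND PROOFS =====

-- A's left fold of intersections applied to any start set is one filter by membership in every player.
theorem foldl_inter_eq_filter (players : List (String × List String)) (s : List String) :
    players.foldl (fun common p => PySem.Set.inter common p.2) s
      = s.filter (fun a => players.all (fun p => p.2.contains a)) := by
  induction players generalizing s with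
  | nil => simp
  | cons q qs ih =>
    simp only [List.foldl_cons, ih, List.all_cons]
    show (s.filter (fun x => q.2.contains x)).filter _ = _
    rw [List.filter_filter]
    exact List.filter_congr (fun a _ => by rw [Bool.and_comm])

-- B's recursion unrolls to the same single filter of ACHIEVEMENTS.
theorem survivors_eq_filter (players : List (String × List String)) :
    survivors players
      = ACHIEVEMENTS.filter (fun a => players.all (fun p => p.2.contains a)) := by
  induction players with
  | nil => simp [survivors]
  | cons q qs ih =>
    simp only [survivors, ih, List.filter_filter, List.all_cons]

theorem get_common_achievements_spec : Claim_equal_get_common_achievements := by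
  intro players _
  show get_common_achievements players = get_common_achievements_alt players
  unfold get_common_achievements get_common_achievements_alt
  have h1 : PySem.Set.ofList ACHIEVEMENTS = ACHIEVEMENTS :=
    PySem.Set.ofList_eq_self_of_nodup ACHIEVEMENTS (by decide)
  rw [h1, foldl_inter_eq_filter, survivors_eq_filter,
    PySem.Set.ofList_eq_self_of_nodup _ (List.Nodup.filter _ (by decide))]
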